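-- pv_equiv track=rewrite | github.com/AI4Science-WestlakeU/cindm | le_pde/pytorch_net/util.py | sort_two_lists
-- ===== SOURCE A (Python) =====
-- from copy import deepcopy, copy
-- import operator
--
-- def sort_two_lists(list1, list2, reverse = False):
--     """Sort two lists according to the first list."""
--     if reverse:
--         List = deepcopy([list(x) for x in zip(*sorted(zip(deepcopy(list1), deepcopy(list2)), key=operator.itemgetter(0), reverse=True))])
--     else:
--         List = deepcopy([list(x) for x in zip(*sorted(zip(deepcopy(list1), deepcopy(list2)), key=operator.itemgetter(0)))])
--     if len(List) == 0:
--         return [], []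
--     else:
--         return List[0], List[1]
-- ===== SOURCE B (Python) =====
-- from copy import deepcopy
--
-- def sort_two_lists(list1, list2, reverse=False):
--     """Sort two lists according to the first list (argsort + gather)."""
--     n = min(len(list1), len(list2))
--     idx = sorted(range(n), key=lambda i: list1[i], reverse=reverse)
--     return [deepcopy(list1[i]) for i in idx], [deepcopy(list2[i]) for i in idx]
-- ===== Notes on version B (the rewrite author's own statement) =====
-- stated objective: simpler
-- what changed: Replaces the zip/deepcopy/sort/zip(*)-unzip pipeline with a stable argsort of indices keyed by list1 followed by two gather passes (copying only the gathered elements), with no empty-case branch.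
import Mathlib
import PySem

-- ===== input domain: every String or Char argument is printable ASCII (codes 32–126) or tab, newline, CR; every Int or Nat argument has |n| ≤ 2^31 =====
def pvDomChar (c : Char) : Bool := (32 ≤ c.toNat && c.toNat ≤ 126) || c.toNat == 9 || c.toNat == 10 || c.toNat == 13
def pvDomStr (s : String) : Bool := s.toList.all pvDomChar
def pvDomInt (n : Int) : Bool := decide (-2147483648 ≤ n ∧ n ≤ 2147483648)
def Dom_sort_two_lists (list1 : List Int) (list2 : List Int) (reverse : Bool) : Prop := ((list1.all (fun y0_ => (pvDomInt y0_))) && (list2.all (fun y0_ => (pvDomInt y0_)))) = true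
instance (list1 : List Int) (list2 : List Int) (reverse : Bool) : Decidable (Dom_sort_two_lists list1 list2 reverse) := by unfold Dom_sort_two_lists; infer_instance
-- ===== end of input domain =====

-- B replaces A's zip/sort/unzip pipeline with a stable argsort of indices keyed by list1 and two gather passes (same result; return value only — neither version mutates its arguments).

-- ===== PORT A =====
-- zip(deepcopy(list1), deepcopy(list2)) truncates to the shorter list (List.zip); deepcopy of ints is the identity
def sort_two_lists (list1 : List Int) (list2 : List Int) (reverse : Bool) : List Int × List Int :=
  let pairs := list1.zip list2
  let s := PySem.List.sorted pairs (fun p => p.1) reverse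
  -- zip(*s): [] when s is empty, otherwise the two component lists
  match s with
  | [] => ([], [])
  | _ => (s.map (fun p => p.1), s.map (fun p => p.2))

-- ===== PORT B =====
def sort_two_lists_alt (list1 : List Int) (list2 : List Int) (reverse : Bool) : List Int × List Int :=
  let n : Nat := min list1.length list2.length
  let idx := PySem.List.sorted (PySem.List.pyRange 0 (n : Int) 1) (fun i => PySem.List.pyGetD list1 i 0) reverse
  (idx.map (fun i => PySem.List.pyGetD list1 i 0), idx.map (fun i => PySem.List.pyGetD list2 i 0))

-- ===== PRECONDITION & SPEC =====
def Spec_sort_two_lists (list1 : List Int) (list2 : List Int) (reverse : Bool) (out : List Int × List Int) : Prop := out = sort_two_lists_alt list1 list2 reverse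
instance (list1 : List Int) (list2 : List Int) (reverse : Bool) (out : List Int × List Int) : Decidable (Spec_sort_two_lists list1 list2 reverse out) := by unfold Spec_sort_two_lists; infer_instance

-- ===== CLAIM (what is proved, stated in full; the proofs are below) =====
def Claim_equal_sort_two_lists : Prop := ∀ (list1 : List Int) (list2 : List Int) (reverse : Bool), Dom_sort_two_lists list1 list2 reverse → Spec_sort_two_lists list1 list2 reverse (sort_two_lists list1 list2 reverse)

-- ===== LEMMAS AND PROOFS =====

-- insertBy commutes with map when the comparison factors through the map
theorem pv_insertBy_map {a b : Type} (f : a → b) (r : b → b → Bool) (x : a) (xs : List a) :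
    PySem.List.insertBy r (f x) (xs.map f)
      = (PySem.List.insertBy (fun u v => r (f u) (f v)) x xs).map f := by
  induction xs with
  | nil => simp [PySem.List.insertBy]
  | cons y ys ih =>
      simp only [List.map_cons, PySem.List.insertBy]
      by_cases h : r (f x) (f y) = true <;> simp [h, ih]

-- stable sort commutes with map when the key factors through the map
theorem pv_sorted_map {a b : Type} (f : a → b) (key : b → Int) (rev : Bool) (xs : List a) :
    PySem.List.sorted (xs.map f) key rev
      = (PySem.List.sorted xs (fun x => key (f x)) rev).map f := by
  simp only [PySem.List.sorted]
  generalize hbef : (if rev = true then fun u v => decide (key v < key u) else fun u v => decide (key u < key v)) = bef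
  have hbef' : (if rev = true then (fun u v => decide (key (f v) < key (f u))) else (fun u v => decide (key (f u) < key (f v)))) = fun u v => bef (f u) (f v) := by
    subst hbef; cases rev <;> rfl
  rw [hbef']
  suffices h : ∀ (acc : List a), List.foldl (fun acc x => PySem.List.insertBy bef x acc) (acc.map f) (xs.map f) = (List.foldl (fun acc x => PySem.List.insertBy (fun u v => bef (f u) (f v)) x acc) acc xs).map f by
    simpa using h []
  induction xs with
  | nil => intro acc; simp
  | cons y ys ih =>
      intro acc
      simp only [List.map_cons, List.foldl_cons, pv_insertBy_map]
      exact ih _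

-- zip of the two lists as a gather over the index range
theorem pv_zip_eq_map_range (list1 list2 : List Int) :
    list1.zip list2
      = (PySem.List.pyRange 0 ((min list1.length list2.length : Nat) : Int) 1).map
          (fun i => (PySem.List.pyGetD list1 i 0, PySem.List.pyGetD list2 i 0)) := by
  rw [PySem.List.pyRange_zero_natCast, List.map_map]
  apply List.ext_getElem
  · simp [List.length_zip]
  · intro k h1 h2
    simp only [List.getElem_map, List.getElem_range, Function.comp_apply]
    have hk : k < min list1.length list2.length := by simpa using h2
    rw [List.getElem_zip]
    rw [PySem.List.pyGetD_natCast, PySem.List.pyGetD_natCast]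
    have hk1 : k < list1.length := lt_of_lt_of_le hk (min_le_left _ _)
    have hk2 : k < list2.length := lt_of_lt_of_le hk (min_le_right _ _)
    simp [List.getD_eq_getElem?_getD, hk1, hk2]

theorem pv_main (list1 list2 : List Int) (reverse : Bool) :
    sort_two_lists list1 list2 reverse = sort_two_lists_alt list1 list2 reverse := by
  unfold sort_two_lists sort_two_lists_alt
  simp only
  rw [pv_zip_eq_map_range list1 list2]
  rw [pv_sorted_map (fun i => (PySem.List.pyGetD list1 i 0, PySem.List.pyGetD list2 i 0)) (fun p => p.1) reverse]
  cases h : PySem.List.sorted (PySem.List.pyRange 0 ((min list1.length list2.length : Nat) : Int) 1) (fun i => PySem.List.pyGetD list1 i 0) reverse with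
  | nil => simp
  | cons i is => simp [List.map_map]

-- ===== VERDICT (by name: the statement is the Claim_ definition above) =====
theorem sort_two_lists_spec : Claim_equal_sort_two_lists := by
  intro list1 list2 reverse _
  unfold Spec_sort_two_lists
  exact pv_main list1 list2 reverse
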